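-- pv_equiv track=rewrite | github.com/ARISTOTILE-GIT/MCP-Powered-Lead-Gen-Enrichment-Outreach-System | App/enrich_leads.py | determine_offline_persona
-- ===== SOURCE A (Python) =====
-- def determine_offline_persona(role):
--     """Determine persona based on role keywords (Offline fallback)"""
--     role_lower = role.lower()
--
--     if any(x in role_lower for x in ['cto', 'engineering', 'tech', 'developer', 'data', 'architect']):
--         return "Technical Decision Maker"
--     elif any(x in role_lower for x in ['cfo', 'finance', 'treasurer', 'audit']):
--         return "Financial Buyer"
--     elif any(x in role_lower for x in ['ceo', 'founder', 'president', 'owner']):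
--         return "Executive Decision Maker"
--     elif any(x in role_lower for x in ['marketing', 'cmo', 'brand']):
--         return "Marketing Lead"
--     elif any(x in role_lower for x in ['hr', 'people', 'talent']):
--         return "HR Decision Maker"
--     elif any(x in role_lower for x in ['manager', 'head', 'director', 'lead']):
--         return "Department Head"
--     else:
--         return "Key Influencer"
-- ===== SOURCE B (Python) =====
-- # Flat keyword->priority-rank map; classify by the minimum rank among ALL matching
-- # keywords (no early exit, no per-rule grouping), then index the persona table.
-- KEYWORD_RANK = [
--     ('cto', 0), ('engineering', 0), ('tech', 0), ('developer', 0), ('data', 0), ('architect', 0),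
--     ('cfo', 1), ('finance', 1), ('treasurer', 1), ('audit', 1),
--     ('ceo', 2), ('founder', 2), ('president', 2), ('owner', 2),
--     ('marketing', 3), ('cmo', 3), ('brand', 3),
--     ('hr', 4), ('people', 4), ('talent', 4),
--     ('manager', 5), ('head', 5), ('director', 5), ('lead', 5),
-- ]
--
-- PERSONAS = [
--     "Technical Decision Maker",
--     "Financial Buyer",
--     "Executive Decision Maker",
--     "Marketing Lead",
--     "HR Decision Maker",
--     "Department Head",
-- ]
--
-- def determine_offline_persona(role):
--     role_lower = role.lower()
--     hits = [rank for kw, rank in KEYWORD_RANK if kw in role_lower]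
--     return PERSONAS[min(hits)] if hits else "Key Influencer"
-- ===== Notes on version B (the rewrite author's own statement) =====
-- stated objective: alternative
-- what changed: Replaces the first-match if/elif rule chain with a flat keyword-to-rank map: B collects the ranks of ALL matching keywords in one pass and returns the persona of the minimum rank, indexing a persona table; priority becomes arithmetic (min) instead of control flow.
import Mathlib
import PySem

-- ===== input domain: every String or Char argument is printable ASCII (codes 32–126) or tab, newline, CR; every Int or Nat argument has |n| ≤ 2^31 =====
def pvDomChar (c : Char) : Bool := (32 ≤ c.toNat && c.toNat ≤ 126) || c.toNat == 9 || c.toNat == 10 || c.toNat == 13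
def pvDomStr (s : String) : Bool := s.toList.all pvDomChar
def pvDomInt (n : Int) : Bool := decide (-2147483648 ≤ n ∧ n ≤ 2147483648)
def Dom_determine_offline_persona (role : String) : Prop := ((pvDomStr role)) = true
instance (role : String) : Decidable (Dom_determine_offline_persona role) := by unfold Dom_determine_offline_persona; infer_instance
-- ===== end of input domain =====

-- B replaces the first-match if/elif chain by a flat keyword→rank map: it collects the
-- ranks of ALL matching keywords in one pass and returns the persona of the minimum rank
-- (priority as arithmetic instead of control flow). Objective: alternative.

-- ===== PORT A =====
def determine_offline_persona (role : String) : String :=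
  let role_lower := PySem.Str.lower role
  if ["cto", "engineering", "tech", "developer", "data", "architect"].any
      (fun x => PySem.Str.isIn x role_lower) then "Technical Decision Maker"
  else if ["cfo", "finance", "treasurer", "audit"].any
      (fun x => PySem.Str.isIn x role_lower) then "Financial Buyer"
  else if ["ceo", "founder", "president", "owner"].any
      (fun x => PySem.Str.isIn x role_lower) then "Executive Decision Maker"
  else if ["marketing", "cmo", "brand"].any
      (fun x => PySem.Str.isIn x role_lower) then "Marketing Lead"
  else if ["hr", "people", "talent"].any
      (fun x => PySem.Str.isIn x role_lower) then "HR Decision Maker"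
  else if ["manager", "head", "director", "lead"].any
      (fun x => PySem.Str.isIn x role_lower) then "Department Head"
  else "Key Influencer"

-- ===== PORT B =====
def pvKeywordRank : List (String × Nat) :=
  [ ("cto", 0), ("engineering", 0), ("tech", 0), ("developer", 0), ("data", 0), ("architect", 0),
    ("cfo", 1), ("finance", 1), ("treasurer", 1), ("audit", 1),
    ("ceo", 2), ("founder", 2), ("president", 2), ("owner", 2),
    ("marketing", 3), ("cmo", 3), ("brand", 3),
    ("hr", 4), ("people", 4), ("talent", 4),
    ("manager", 5), ("head", 5), ("director", 5), ("lead", 5) ]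

def pvPersonas : List String :=
  [ "Technical Decision Maker", "Financial Buyer", "Executive Decision Maker",
    "Marketing Lead", "HR Decision Maker", "Department Head" ]

def determine_offline_persona_alt (role : String) : String :=
  let role_lower := PySem.Str.lower role
  let hits := (pvKeywordRank.filter (fun p => PySem.Str.isIn p.1 role_lower)).map (fun p => p.2)
  -- PERSONAS[min(hits)] if hits else "Key Influencer"; the rank min(hits) is always < 6,
  -- so Python's indexing never raises and List.getD is exact here
  match PySem.List.min? hits (fun x => x) with
  | some r => pvPersonas.getD r "Key Influencer"
  | none => "Key Influencer"

-- ===== PRECONDITION & SPEC =====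
def Spec_determine_offline_persona (role : String) (out : String) : Prop := out = determine_offline_persona_alt role
instance (role : String) (out : String) : Decidable (Spec_determine_offline_persona role out) := by unfold Spec_determine_offline_persona; infer_instance

-- ===== CLAIM (what is proved, stated in full; the proofs are below) =====
def Claim_equal_determine_offline_persona : Prop := ∀ (role : String), Dom_determine_offline_persona role → Spec_determine_offline_persona role (determine_offline_persona role)

-- ===== LEMMAS AND PROOFS =====

-- folding min over a list of elements all ≥ r keeps r
theorem pv_foldl_min_const (r : Nat) (l : List Nat) (h : ∀ x ∈ l, r ≤ x) :
    l.foldl min r = r := by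
  induction l with
  | nil => rfl
  | cons a t ih =>
      have ha : min r a = r := Nat.min_eq_left (h a (by simp))
      simp only [List.foldl_cons, ha]
      exact ih (fun x hx => h x (by simp [hx]))

-- peeling one rank group off the flat keyword list: if the group has a match its rank r
-- is the minimum (everything behind it ranks ≥ r); otherwise the group contributes nothing
theorem pv_min_group (p : String → Bool) (g rest : List (String × Nat)) (r : Nat)
    (hg : ∀ x ∈ g, x.2 = r) (hrest : ∀ x ∈ rest, r ≤ x.2) :
    PySem.List.min? (((g ++ rest).filter (fun q => p q.1)).map (fun q => q.2)) (fun x => x) =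
      if g.any (fun q => p q.1) then some r
      else PySem.List.min? ((rest.filter (fun q => p q.1)).map (fun q => q.2)) (fun x => x) := by
  rw [List.filter_append, List.map_append]
  by_cases hany : g.any (fun q => p q.1)
  · simp only [hany, if_true]
    obtain ⟨a, ha, hpa⟩ := List.any_eq_true.mp hany
    have hne : (g.filter (fun q => p q.1)).map (fun q => q.2) ≠ [] := by
      simp only [ne_eq, List.map_eq_nil_iff, List.filter_eq_nil_iff]
      push Not
      exact ⟨a, ha, by simpa using hpa⟩
    obtain ⟨b, t, hbt⟩ := List.exists_cons_of_ne_nil hne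
    rw [hbt, List.cons_append, PySem.List.min?_id_cons]
    have hb : b = r := by
      have : b ∈ (g.filter (fun q => p q.1)).map (fun q => q.2) := by rw [hbt]; simp
      obtain ⟨q, hq, hq2⟩ := List.mem_map.mp this
      exact hq2 ▸ hg q (List.mem_of_mem_filter hq)
    subst hb
    congr 1
    apply pv_foldl_min_const
    intro x hx
    rcases List.mem_append.mp hx with hx | hx
    · have : x ∈ (g.filter (fun q => p q.1)).map (fun q => q.2) := by rw [hbt]; simp [hx]
      obtain ⟨q, hq, hq2⟩ := List.mem_map.mp this
      exact le_of_eq (hq2 ▸ (hg q (List.mem_of_mem_filter hq))).symm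
    · obtain ⟨q, hq, hq2⟩ := List.mem_map.mp hx
      exact hq2 ▸ hrest q (List.mem_of_mem_filter hq)
  · simp only [hany]
    have : g.filter (fun q => p q.1) = [] := by
      rw [List.filter_eq_nil_iff]
      intro q hq
      simp only [List.any_eq_true] at hany
      push Not at hany
      simpa using (hany q hq)
    rw [this]
    rfl

-- ===== VERDICT (by name: the statement is the Claim_ definition above) =====
theorem determine_offline_persona_spec : Claim_equal_determine_offline_persona := by
  intro role _
  unfold Spec_determine_offline_persona determine_offline_persona determine_offline_persona_alt
  set rl := PySem.Str.lower role with hrl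
  set p : String → Bool := fun s => PySem.Str.isIn s rl with hp
  show _ = (match PySem.List.min? ((pvKeywordRank.filter (fun q => p q.1)).map (fun q => q.2)) (fun x => x) with
    | some r => pvPersonas.getD r "Key Influencer"
    | none => "Key Influencer")
  have hsplit : pvKeywordRank =
      [("cto", 0), ("engineering", 0), ("tech", 0), ("developer", 0), ("data", 0), ("architect", 0)] ++
      ([("cfo", 1), ("finance", 1), ("treasurer", 1), ("audit", 1)] ++
      ([("ceo", 2), ("founder", 2), ("president", 2), ("owner", 2)] ++
      ([("marketing", 3), ("cmo", 3), ("brand", 3)] ++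
      ([("hr", 4), ("people", 4), ("talent", 4)] ++
      ([("manager", 5), ("head", 5), ("director", 5), ("lead", 5)] ++ ([] : List (String × Nat))))))) := rfl
  rw [hsplit,
    pv_min_group p _ _ 0 (by decide) (by decide),
    pv_min_group p _ _ 1 (by decide) (by decide),
    pv_min_group p _ _ 2 (by decide) (by decide),
    pv_min_group p _ _ 3 (by decide) (by decide),
    pv_min_group p _ _ 4 (by decide) (by decide),
    pv_min_group p _ _ 5 (by decide) (by decide)]
  simp only [List.any_cons, List.any_nil, Bool.or_false, List.filter_nil, List.map_nil]
  split_ifs <;> rfl
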